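-- pv_equiv track=rewrite | github.com/mazarady/Advanced-Python-Programming | Data Structures & Graphs/q1solution.py | reviewer_rank
-- ===== SOURCE A (Python) =====
-- def reviewer_rank(db : {str:{(str,int)}}) -> [(str,int)]:
--     alist = [name[0] for k, v in db.items() for name in v]
--     final = []
--     for k, v in db.items():
--         for name in v:
--
--             value = alist.count(name[0])
--             atuple = (name[0], value)
--             if atuple not in final:
--
--                 final.append(atuple)
--
--     final.sort(key = lambda x: (-x[1],x[0]))
--     return final
-- ===== SOURCE B (Python) =====
-- def reviewer_rank(db : {str:{(str,int)}}) -> [(str,int)]: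
--     names = sorted(name for v in db.values() for name, _ in v)
--     final = []
--     i = 0
--     while i < len(names):
--         j = i + 1
--         while j < len(names) and names[j] == names[i]:
--             j += 1
--         final.append((names[i], j - i))
--         i = j
--     final.sort(key=lambda x: (-x[1], x[0]))
--     return final
-- ===== Notes on version B (the rewrite author's own statement) =====
-- stated objective: faster
-- what changed: B flattens all names once, sorts them and emits (name, run-length) pairs in one linear grouping pass, replacing A's per-tuple alist.count scan and the 'pair not in final' list-membership dedup (both quadratic) with sort-based grouping.
import Mathlib
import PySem

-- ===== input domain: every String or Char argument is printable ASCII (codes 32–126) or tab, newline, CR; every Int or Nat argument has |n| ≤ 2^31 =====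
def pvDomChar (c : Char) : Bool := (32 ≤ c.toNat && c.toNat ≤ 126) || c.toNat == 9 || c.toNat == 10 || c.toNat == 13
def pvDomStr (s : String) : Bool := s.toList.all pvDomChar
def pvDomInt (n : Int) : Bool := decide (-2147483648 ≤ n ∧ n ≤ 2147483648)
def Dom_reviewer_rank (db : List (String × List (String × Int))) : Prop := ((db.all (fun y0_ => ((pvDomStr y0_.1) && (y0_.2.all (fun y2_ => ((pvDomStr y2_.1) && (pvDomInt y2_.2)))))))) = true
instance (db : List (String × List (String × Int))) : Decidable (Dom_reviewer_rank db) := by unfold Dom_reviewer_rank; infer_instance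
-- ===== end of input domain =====

-- B replaces A's per-tuple alist.count scan and 'pair not in final' dedup with one sort-based run-length grouping pass (faster).

-- ===== PORT A =====
-- alist = [name[0] for k, v in db.items() for name in v]
-- for each tuple: value = alist.count(name[0]); append (name[0], value) if unseen; then sort by (-count, name)
def reviewer_rank (db : List (String × List (String × Int))) : List (String × Int) :=
  let alist : List String := db.flatMap (fun kv => kv.2.map (fun name => name.1))
  let final : List (String × Int) :=
    db.foldl (fun acc kv =>
      kv.2.foldl (fun acc name =>
        let value : Int := (PySem.List.count alist name.1 : Int)
        let atuple : String × Int := (name.1, value)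
        if atuple ∈ acc then acc else acc ++ [atuple]) acc) []
  PySem.List.sorted2 final (fun x => -x.2) (fun x => x.1)

-- ===== PORT B =====
-- the two nested while loops of Source B, as the structural recursion on the sorted name list:
-- each step emits (names[i], j - i) for the maximal run of names[i] and continues at j
def pvGroupRuns : List String → List (String × Int)
  | [] => []
  | x :: xs =>
    (x, ((xs.takeWhile (· == x)).length : Int) + 1) :: pvGroupRuns (xs.dropWhile (· == x))
  termination_by l => l.length
  decreasing_by
    exact Nat.lt_succ_of_le (List.length_dropWhile_le _ _)

def reviewer_rank_alt (db : List (String × List (String × Int))) : List (String × Int) :=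
  let names : List String :=
    PySem.List.sorted (db.flatMap (fun kv => kv.2.map (fun name => name.1))) (fun s => s)
  let final : List (String × Int) := pvGroupRuns names
  PySem.List.sorted2 final (fun x => -x.2) (fun x => x.1)

-- ===== PRECONDITION & SPEC =====
def Spec_reviewer_rank (db : List (String × List (String × Int))) (out : List (String × Int)) : Prop := out = reviewer_rank_alt db
instance (db : List (String × List (String × Int))) (out : List (String × Int)) : Decidable (Spec_reviewer_rank db out) := by unfold Spec_reviewer_rank; infer_instance

-- ===== CLAIM (what is proved, stated in full; the proofs are below) =====
def Claim_equal_reviewer_rank : Prop := ∀ (db : List (String × List (String × Int))), Dom_reviewer_rank db → Spec_reviewer_rank db (reviewer_rank db)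

-- ===== LEMMAS AND PROOFS =====

-- a nested loop over db's groups is the loop over the flattened tuple list
lemma pv_foldl_nested {β : Type} (db : List (String × List (String × Int)))
    (g : β → (String × Int) → β) (init : β) :
    db.foldl (fun acc kv => kv.2.foldl g acc) init
      = (db.flatMap (fun kv => kv.2)).foldl g init := by
  induction db generalizing init with
  | nil => rfl
  | cons kv rest ih => simp [List.flatMap_cons, List.foldl_append, ih]

-- Python's tuple key (-count, name) is the single lexicographic key toLex (-count, name)
lemma pv_sorted2_eq_sorted_toLex {α : Type} (xs : List α) (k1 : α → Int) (k2 : α → String) :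
    PySem.List.sorted2 xs k1 k2
      = PySem.List.sorted xs (fun x => toLex (k1 x, k2 x)) := by
  have hfun : (fun a b => decide (k1 a < k1 b) || (!decide (k1 b < k1 a) && decide (k2 a < k2 b)))
      = (fun a b : α => decide (toLex (k1 a, k2 a) < toLex (k1 b, k2 b))) := by
    funext a b
    by_cases h1 : k1 a < k1 b <;> by_cases h2 : k1 b < k1 a <;> by_cases h3 : k2 a < k2 b <;>
      simp [h1, h2, h3, Prod.Lex.lt_iff] <;> omega
  simp only [PySem.List.sorted2, PySem.List.sorted, Bool.false_eq_true, if_false]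
  rw [hfun]

-- first occurrence in a run-sorted list: x does not reappear after its run
lemma pv_not_mem_dropWhile (x : String) (xs : List String)
    (hle : ∀ y ∈ xs, x ≤ y) (hp : xs.Pairwise (· ≤ ·)) :
    x ∉ xs.dropWhile (· == x) := by
  intro hx
  have hsub := List.dropWhile_sublist (l := xs) (· == x)
  cases hd : xs.dropWhile (· == x) with
  | nil => simp [hd] at hx
  | cons y t =>
    have hy : (y == x) = false := by
      have := List.head?_dropWhile_not (· == x) xs
      rw [hd] at this; simpa using this
    have hyx : y ≠ x := by intro e; subst e; simp at hy
    rw [hd] at hx hsub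
    have hxley : x ≤ y := hle y (hsub.subset (by simp))
    rcases List.mem_cons.mp hx with e | ht
    · exact hyx e.symm
    · have hpd : (y :: t).Pairwise (· ≤ ·) := hp.sublist hsub
      have hylex : y ≤ x := (List.pairwise_cons.mp hpd).1 x ht
      exact hyx (le_antisymm hylex hxley)

-- membership in pvGroupRuns of a sorted list: exactly the (name, total count) pairs
lemma pvGroupRuns_mem (ns : List String) (hp : ns.Pairwise (· ≤ ·)) (p : String × Int) :
    p ∈ pvGroupRuns ns ↔ ∃ n, n ∈ ns ∧ p = (n, (ns.count n : Int)) := by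
  induction ns using pvGroupRuns.induct with
  | case1 => simp [pvGroupRuns]
  | case2 x xs ih =>
    rw [pvGroupRuns]
    have hle : ∀ y ∈ xs, x ≤ y := (List.pairwise_cons.mp hp).1
    have hpxs : xs.Pairwise (· ≤ ·) := (List.pairwise_cons.mp hp).2
    have hxs : xs.takeWhile (· == x) ++ xs.dropWhile (· == x) = xs :=
      List.takeWhile_append_dropWhile
    have hallt : ∀ y ∈ xs.takeWhile (· == x), y = x := by
      intro y hy
      have hb := List.mem_takeWhile_imp (p := (· == x)) hy
      exact eq_of_beq hb
    have hxd : x ∉ xs.dropWhile (· == x) := pv_not_mem_dropWhile x xs hle hpxs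
    have hpd : (xs.dropWhile (· == x)).Pairwise (· ≤ ·) :=
      hpxs.sublist (List.dropWhile_sublist _)
    have ihm := ih hpd
    -- count of x in the whole list is the run length + 1
    have h1 : (xs.takeWhile (· == x)).count x = (xs.takeWhile (· == x)).length := by
      rw [List.count_eq_length]; intro b hb; exact (hallt b hb).symm
    have h2 : (xs.dropWhile (· == x)).count x = 0 := List.count_eq_zero.mpr hxd
    have hxcount : xs.count x = (xs.takeWhile (· == x)).length := by
      conv_lhs => rw [← hxs]
      rw [List.count_append, h1, h2]
      omega
    have hcx : (x :: xs).count x = (xs.takeWhile (· == x)).length + 1 := by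
      rw [List.count_cons_self, hxcount]
    -- count of any later name is its count in the remainder
    have hcn : ∀ n ∈ xs.dropWhile (· == x), (x :: xs).count n = (xs.dropWhile (· == x)).count n := by
      intro n hn
      have hnx : n ≠ x := fun e => hxd (e ▸ hn)
      have h0 : (xs.takeWhile (· == x)).count n = 0 := by
        rw [List.count_eq_zero]; intro hmem; exact hnx (hallt n hmem)
      rw [List.count_cons_of_ne (Ne.symm hnx)]
      conv_lhs => rw [← hxs]
      rw [List.count_append, h0]
      omega
    constructor
    · intro hmem
      rcases List.mem_cons.mp hmem with e | hrec
      · refine ⟨x, List.mem_cons_self, ?_⟩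
        rw [e, hcx]; push_cast; rfl
      · obtain ⟨n, hn, hpe⟩ := ihm.mp hrec
        refine ⟨n, ?_, ?_⟩
        · exact List.mem_cons_of_mem _ (hxs ▸ List.mem_append_right _ hn)
        · rw [hpe, hcn n hn]
    · rintro ⟨n, hn, hpe⟩
      rcases List.mem_cons.mp hn with e | hnxs
      · subst e
        refine List.mem_cons.mpr (Or.inl ?_)
        rw [hpe, hcx]; push_cast; rfl
      · have hsplit : n ∈ xs.takeWhile (· == x) ++ xs.dropWhile (· == x) := by
          rw [hxs]; exact hnxs
        rcases List.mem_append.mp hsplit with hmt | hmd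
        · have hnex : n = x := hallt n hmt
          subst hnex
          refine List.mem_cons.mpr (Or.inl ?_)
          rw [hpe, hcx]; push_cast; rfl
        · exact List.mem_cons.mpr (Or.inr (ihm.mpr ⟨n, hmd, by rw [hpe, hcn n hmd]⟩))

-- the emitted names are strictly increasing, so the pairs are distinct
lemma pvGroupRuns_pairwise (ns : List String) (hp : ns.Pairwise (· ≤ ·)) :
    (pvGroupRuns ns).Pairwise (fun a b => a.1 < b.1) := by
  induction ns using pvGroupRuns.induct with
  | case1 => simp [pvGroupRuns]
  | case2 x xs ih =>
    rw [pvGroupRuns]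
    have hle : ∀ y ∈ xs, x ≤ y := (List.pairwise_cons.mp hp).1
    have hpxs : xs.Pairwise (· ≤ ·) := (List.pairwise_cons.mp hp).2
    have hxd : x ∉ xs.dropWhile (· == x) := pv_not_mem_dropWhile x xs hle hpxs
    have hpd : (xs.dropWhile (· == x)).Pairwise (· ≤ ·) :=
      hpxs.sublist (List.dropWhile_sublist _)
    refine List.pairwise_cons.mpr ⟨?_, ih hpd⟩
    intro q hq
    obtain ⟨n, hn, hpe⟩ := (pvGroupRuns_mem _ hpd q).mp hq
    have hmem : n ∈ xs := (List.dropWhile_sublist _).subset hn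
    have h1 : x ≤ n := hle n hmem
    have h2 : n ≠ x := fun e => hxd (e ▸ hn)
    rw [hpe]
    exact lt_of_le_of_ne h1 (Ne.symm h2)

lemma pvGroupRuns_nodup (ns : List String) (hp : ns.Pairwise (· ≤ ·)) :
    (pvGroupRuns ns).Nodup :=
  (pvGroupRuns_pairwise ns hp).imp (fun h => by
    intro e; rw [e] at h; exact lt_irrefl _ h)

-- the combined sort key is injective, so sorting two permutations gives the same list
lemma pv_key_injective :
    Function.Injective (fun p : String × Int => toLex (-p.2, p.1)) := by
  intro p q h
  have h' : ((-p.2, p.1) : Int × String) = (-q.2, q.1) := by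
    simpa using congrArg ofLex h
  obtain ⟨h1, h2⟩ := Prod.mk.injEq _ _ _ _ ▸ h'
  exact Prod.ext h2 (by omega)

-- core equality: A's dedup'd (name, count) set, sorted, is B's grouped run-length list, sorted
lemma pv_core (ys : List String) :
    PySem.List.sorted2 (PySem.Set.ofList (ys.map (fun n => (n, (ys.count n : Int)))))
        (fun x => -x.2) (fun x => x.1)
      = PySem.List.sorted2 (pvGroupRuns (PySem.List.sorted ys (fun s => s)))
        (fun x => -x.2) (fun x => x.1) := by
  have hperm : (PySem.List.sorted ys (fun s => s)).Perm ys := PySem.List.sorted_perm ys _ _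
  have hp : (PySem.List.sorted ys (fun s => s)).Pairwise (· ≤ ·) := by
    have := PySem.List.sorted_pairwise ys (fun s => s)
    simpa using this
  have hmem1 : ∀ p : String × Int,
      p ∈ PySem.Set.ofList (ys.map (fun n => (n, (ys.count n : Int))))
        ↔ ∃ n, n ∈ ys ∧ p = (n, (ys.count n : Int)) := by
    intro p
    rw [PySem.Set.mem_ofList, List.mem_map]
    constructor
    · rintro ⟨n, hn, e⟩; exact ⟨n, hn, e.symm⟩
    · rintro ⟨n, hn, e⟩; exact ⟨n, hn, e.symm⟩
  have hmem2 : ∀ p : String × Int,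
      p ∈ pvGroupRuns (PySem.List.sorted ys (fun s => s))
        ↔ ∃ n, n ∈ ys ∧ p = (n, (ys.count n : Int)) := by
    intro p
    rw [pvGroupRuns_mem _ hp p]
    constructor
    · rintro ⟨n, hn, e⟩
      exact ⟨n, hperm.subset hn, by rw [e, hperm.count_eq]⟩
    · rintro ⟨n, hn, e⟩
      exact ⟨n, hperm.symm.subset hn, by rw [e, hperm.count_eq]⟩
  have hnd1 : (PySem.Set.ofList (ys.map (fun n => (n, (ys.count n : Int))))).Nodup :=
    PySem.Set.nodup_ofList _
  have hnd2 : (pvGroupRuns (PySem.List.sorted ys (fun s => s))).Nodup :=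
    pvGroupRuns_nodup _ hp
  have hperm12 :
      (PySem.Set.ofList (ys.map (fun n => (n, (ys.count n : Int))))).Perm
        (pvGroupRuns (PySem.List.sorted ys (fun s => s))) := by
    rw [List.perm_ext_iff_of_nodup hnd1 hnd2]
    intro p; rw [hmem1 p, hmem2 p]
  rw [pv_sorted2_eq_sorted_toLex, pv_sorted2_eq_sorted_toLex]
  exact PySem.List.sorted_eq_sorted_of_perm _ _ _ pv_key_injective hperm12

-- ===== VERDICT (by name: the statement is the Claim_ definition above) =====
theorem reviewer_rank_spec : Claim_equal_reviewer_rank := by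
  intro db _
  simp only [Spec_reviewer_rank, reviewer_rank, reviewer_rank_alt]
  have halist : db.flatMap (fun kv => kv.2.map (fun name => name.1))
      = (db.flatMap (fun kv => kv.2)).map (fun nm => nm.1) := List.map_flatMap.symm
  rw [pv_foldl_nested]
  simp only [← PySem.Set.add_eq_ite]
  rw [← PySem.Set.update_map_eq_foldl_add (db.flatMap (fun kv => kv.2))
      (fun name => (name.1, (PySem.List.count (db.flatMap (fun kv => kv.2.map (fun name => name.1))) name.1 : Int))),
      PySem.Set.update_nil_left]
  have hmap : (db.flatMap (fun kv => kv.2)).map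
        (fun name => (name.1, (PySem.List.count (db.flatMap (fun kv => kv.2.map (fun name => name.1))) name.1 : Int)))
      = (db.flatMap (fun kv => kv.2.map (fun name => name.1))).map
        (fun n => (n, (PySem.List.count (db.flatMap (fun kv => kv.2.map (fun name => name.1))) n : Int))) := by
    rw [halist, List.map_map]; rfl
  rw [hmap]
  simpa [PySem.List.count_eq] using pv_core (db.flatMap (fun kv => kv.2.map (fun name => name.1)))
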